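-- pv_equiv track=rewrite | github.com/pbaratta/good_luck_time | good_luck.py | is_steps
-- ===== SOURCE A (Python) =====
-- import itertools
--
-- def pairwise(iterable):
-- 	's -> (s0,s1), (s1,s2), (s2, s3), ...'
-- 	a, b = itertools.tee(iterable)
-- 	next(b, None)
-- 	return zip(a, b)
--
-- def is_steps(time_tup):
-- 	' are the digits incrementing/decrementing? '
--
-- 	# all the differences between successive digits
-- 	digit_diffs = [
-- 		b - a
-- 		for (a,b) in pairwise(time_tup)
-- 	]
--
-- 	# how many unique values?
-- 	digit_diffs = set(digit_diffs)
-- 	if len(digit_diffs) == 1: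
-- 		digit_diff = digit_diffs.pop()
--
-- 		if digit_diff == -1:
-- 			return (True, 'decrementing')
-- 		elif digit_diff == 1:
-- 			return (True, 'incrementing')
-- 		else:
-- 			return (False, None)
--
-- 	return (False, None)
-- ===== SOURCE B (Python) =====
-- def is_steps(time_tup):
-- 	' are the digits incrementing/decrementing? '
-- 	n = len(time_tup)
-- 	if n < 2:
-- 		return (False, None)
-- 	first = time_tup[0]
-- 	if list(time_tup) == [first + i for i in range(n)]:
-- 		return (True, 'incrementing')
-- 	if list(time_tup) == [first - i for i in range(n)]:
-- 		return (True, 'decrementing')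
-- 	return (False, None)
-- ===== Notes on version B (the rewrite author's own statement) =====
-- stated objective: simpler
-- what changed: Instead of computing successive differences and deduplicating them into a set, B guards on length < 2, constructs the expected incrementing and decrementing arithmetic sequences from the first element and compares for equality.
import Mathlib
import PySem

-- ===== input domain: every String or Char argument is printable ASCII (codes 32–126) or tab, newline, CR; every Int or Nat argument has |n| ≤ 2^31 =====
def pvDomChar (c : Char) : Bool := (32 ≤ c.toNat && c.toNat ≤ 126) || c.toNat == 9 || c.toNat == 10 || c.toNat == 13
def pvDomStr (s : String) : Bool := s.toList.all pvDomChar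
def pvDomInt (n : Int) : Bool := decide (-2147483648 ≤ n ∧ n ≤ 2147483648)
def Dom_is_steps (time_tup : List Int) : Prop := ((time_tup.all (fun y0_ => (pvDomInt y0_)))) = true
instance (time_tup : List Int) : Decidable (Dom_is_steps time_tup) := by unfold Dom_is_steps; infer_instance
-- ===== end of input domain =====

-- B replaces A's successive-difference + set-deduplication pipeline with a simpler build-and-compare:
-- guard len < 2, construct the expected incrementing/decrementing sequences from the first element, compare.


-- ===== PORT A =====
def is_steps (time_tup : List Int) : Bool × Option String :=
  -- pairwise(time_tup) = zip of the list with its tail (itertools.tee + next, exact)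
  let digit_diffs := (time_tup.zip time_tup.tail).map (fun p => p.2 - p.1)
  let s := PySem.Set.ofList digit_diffs
  if PySem.Set.len s = 1 then
    -- set.pop() on a singleton set: its unique element
    let digit_diff := s.headD 0
    if digit_diff = -1 then (true, some "decrementing")
    else if digit_diff = 1 then (true, some "incrementing")
    else (false, none)
  else (false, none)

-- ===== PORT B =====
def is_steps_alt (time_tup : List Int) : Bool × Option String :=
  let n := time_tup.length
  if n < 2 then (false, none)
  else
    let first := time_tup.headD 0   -- time_tup[0]; guarded by n ≥ 2
    if time_tup = (List.range n).map (fun i : Nat => first + (i : Int)) then (true, some "incrementing")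
    else if time_tup = (List.range n).map (fun i : Nat => first - (i : Int)) then (true, some "decrementing")
    else (false, none)

-- ===== PRECONDITION & SPEC =====
def Spec_is_steps (time_tup : List Int) (out : Bool × Option String) : Prop := out = is_steps_alt time_tup
instance (time_tup : List Int) (out : Bool × Option String) : Decidable (Spec_is_steps time_tup out) := by unfold Spec_is_steps; infer_instance

-- ===== CLAIM (what is proved, stated in full; the proofs are below) =====
def Claim_equal_is_steps : Prop := ∀ (time_tup : List Int), Dom_is_steps time_tup → Spec_is_steps time_tup (is_steps time_tup)

-- ===== LEMMAS AND PROOFS =====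

-- a list 'first :: xs' is the arithmetic sequence of step d starting at first
-- iff every successive difference is d
theorem chain_iff (d : Int) (xs : List Int) : ∀ (first : Int),
    (first :: xs = (List.range (xs.length + 1)).map (fun i : Nat => first + d * (i : Int))
      ↔ ∀ p ∈ (first :: xs).zip xs, p.2 - p.1 = d) := by
  induction xs with
  | nil => intro first; simp
  | cons y ys ih =>
    intro first
    rw [show (y :: ys).length + 1 = ys.length + 1 + 1 from rfl, List.range_succ_eq_map,
        List.map_cons, List.map_map]
    have hf : (fun i : Nat => first + d * (i : Int)) ∘ Nat.succ
        = (fun i : Nat => (first + d) + d * (i : Int)) := by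
      funext i; simp; ring
    rw [hf]
    have t := ih (first + d)
    rw [List.range_succ_eq_map] at t ⊢
    simp only [List.map_cons, List.map_map, List.cons.injEq, List.zip_cons_cons,
      List.forall_mem_cons, Nat.cast_zero, mul_zero, add_zero, true_and] at t ⊢
    constructor
    · rintro ⟨hy, h2⟩
      refine ⟨by omega, ?_⟩
      subst hy
      exact t.mp h2
    · rintro ⟨h1, h2⟩
      have hy : y = first + d := by omega
      subst hy
      exact ⟨rfl, t.mpr h2⟩

theorem ofList_eq_singleton_iff (l : List Int) (d : Int) :
    PySem.Set.ofList l = [d] ↔ d ∈ l ∧ ∀ x ∈ l, x = d := by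
  constructor
  · intro h
    constructor
    · have : d ∈ PySem.Set.ofList l := by rw [h]; simp
      exact (PySem.Set.mem_ofList l d).mp this
    · intro x hx
      have : x ∈ PySem.Set.ofList l := (PySem.Set.mem_ofList l x).mpr hx
      rw [h] at this; simpa using this
  · rintro ⟨hd, hall⟩
    have hnd := PySem.Set.nodup_ofList (α := Int) l
    have hmem : ∀ x, x ∈ PySem.Set.ofList l ↔ x ∈ l := fun x => PySem.Set.mem_ofList l x
    rcases hs : PySem.Set.ofList l with _ | ⟨e, _ | ⟨f, rest⟩⟩
    · exact absurd ((hmem d).mpr hd) (by rw [hs]; simp)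
    · have : e = d := hall e ((hmem e).mp (by rw [hs]; simp))
      rw [this]
    · exfalso
      rw [hs] at hnd
      have he : e = d := hall e ((hmem e).mp (by rw [hs]; simp))
      have hfd : f = d := hall f ((hmem f).mp (by rw [hs]; simp))
      simp [he, hfd] at hnd

-- set length 1 means the set is a singleton
theorem len_eq_one (s : PySem.Set Int) : PySem.Set.len s = 1 ↔ ∃ e, s = [e] := by
  simp [PySem.Set.len, ← List.length_eq_one_iff]

-- ===== VERDICT (by name: the statement is the Claim_ definition above) =====
theorem is_steps_spec : Claim_equal_is_steps := by
  intro xs _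
  unfold Spec_is_steps
  match xs with
  | [] => rfl
  | [x] => rfl
  | x :: y :: rest =>
    have hinc := chain_iff 1 (y :: rest) x
    have hdec := chain_iff (-1) (y :: rest) x
    have e1 : (List.range ((y :: rest).length + 1)).map (fun i : Nat => x + 1 * (i : Int))
        = (List.range (x :: y :: rest).length).map (fun i : Nat => x + (i : Int)) := by
      simp
    have e2 : (List.range ((y :: rest).length + 1)).map (fun i : Nat => x + (-1) * (i : Int))
        = (List.range (x :: y :: rest).length).map (fun i : Nat => x - (i : Int)) := by
      simp [sub_eq_add_neg]
    rw [e1] at hinc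
    rw [e2] at hdec
    have hSing : ∀ d : Int,
        PySem.Set.ofList (((x :: y :: rest).zip (y :: rest)).map (fun p => p.2 - p.1)) = [d]
          ↔ ∀ p ∈ (x :: y :: rest).zip (y :: rest), p.2 - p.1 = d := by
      intro d
      rw [ofList_eq_singleton_iff]
      constructor
      · rintro ⟨-, hall⟩ p hp
        exact hall _ (List.mem_map_of_mem hp)
      · intro h
        constructor
        · have h0 : (x, y) ∈ (x :: y :: rest).zip (y :: rest) := by
            simp [List.zip_cons_cons]
          have hv := h _ h0
          have := List.mem_map_of_mem (f := fun p : Int × Int => p.2 - p.1) h0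
          rw [← hv]; exact this
        · intro v hv
          obtain ⟨p, hp, rfl⟩ := List.mem_map.mp hv
          exact h p hp
    have hI := (hSing 1).trans hinc.symm
    have hD := (hSing (-1)).trans hdec.symm
    simp only [is_steps, is_steps_alt, List.tail_cons, List.headD_cons]
    have hn2 : ¬ ((x :: y :: rest).length < 2) := by simp
    rw [if_neg hn2]
    by_cases hp1 : PySem.Set.ofList (((x :: y :: rest).zip (y :: rest)).map (fun p => p.2 - p.1)) = [1]
    · rw [if_pos (hI.mp hp1)]
      simp only [hp1]
      norm_num [PySem.Set.len]
    · by_cases hm1 : PySem.Set.ofList (((x :: y :: rest).zip (y :: rest)).map (fun p => p.2 - p.1)) = [-1]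
      · rw [if_neg (fun h => hp1 (hI.mpr h)), if_pos (hD.mp hm1)]
        simp only [hm1]
        norm_num [PySem.Set.len]
      · rw [if_neg (fun h => hp1 (hI.mpr h)), if_neg (fun h => hm1 (hD.mpr h))]
        by_cases hlen : PySem.Set.len (PySem.Set.ofList (((x :: y :: rest).zip (y :: rest)).map (fun p => p.2 - p.1))) = 1
        · obtain ⟨e, he⟩ := (len_eq_one _).mp hlen
          simp only [he]
          have he1 : e ≠ 1 := fun h => hp1 (h ▸ he)
          have hem : e ≠ -1 := fun h => hm1 (h ▸ he)
          simp [PySem.Set.len, he1, hem]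
        · rw [if_neg hlen]
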